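-- pv_equiv track=rewrite | github.com/prash-kr-meena/GoogleR | CodingNinjas/Recursion1/AssignmentA/Count_Zeros_In_A_Number.py | count_zeros_v2
-- ===== SOURCE A (Python) =====
-- def count_zeros_v2(string, n) -> int:
--     if n == 0:
--         return 0  # exhausted the search space
--
--     # Hypothesis
--     zero_count_in_smaller_num = count_zeros_v2(string, n - 1)
--
--     # Induction
--     last_element = string[n - 1]
--     if last_element == '0':
--         return zero_count_in_smaller_num + 1
--     else:
--         return zero_count_in_smaller_num
-- ===== SOURCE B (Python) =====
-- def count_zeros_v2(string, n) -> int: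
--     count = 0
--     for i in range(n):
--         if string[i] == '0':
--             count += 1
--     return count
-- ===== Notes on version B (the rewrite author's own statement) =====
-- stated objective: idiomatic
-- what changed: Replaces the top-down recursion (which examines string[n-1] after recursing on n-1) with a flat iterative loop over range(n) accumulating a counter.
import Mathlib
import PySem

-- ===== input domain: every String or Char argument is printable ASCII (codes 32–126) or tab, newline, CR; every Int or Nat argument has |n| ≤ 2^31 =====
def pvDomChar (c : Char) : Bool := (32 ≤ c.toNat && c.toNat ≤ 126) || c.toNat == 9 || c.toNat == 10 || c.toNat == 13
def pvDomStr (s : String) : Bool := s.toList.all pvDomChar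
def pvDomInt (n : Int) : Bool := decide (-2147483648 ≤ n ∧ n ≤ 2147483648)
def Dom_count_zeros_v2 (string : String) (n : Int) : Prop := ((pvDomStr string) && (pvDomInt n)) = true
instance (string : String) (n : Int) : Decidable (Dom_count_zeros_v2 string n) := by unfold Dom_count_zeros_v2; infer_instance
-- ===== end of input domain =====

-- B replaces A's top-down recursion with a flat iterative count over range(n); idiomatic, same O(n) cost.


-- ===== PORT A =====
-- A's recursion on n, mirrored as structural recursion on n.toNat (negative n, where the
-- Python recursion diverges, is outside Pre_); string[n-1] ported via pyGetD (the out-of-range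
-- IndexError case is outside Pre_).
def countZerosRecA (s : List Char) : Nat → Int
  | 0 => 0
  | k + 1 =>
    let zero_count_in_smaller_num := countZerosRecA s k
    let last_element := PySem.List.pyGetD s (k : Int) ' '
    if last_element = '0' then zero_count_in_smaller_num + 1 else zero_count_in_smaller_num

def count_zeros_v2 (string : String) (n : Int) : Int :=
  if n = 0 then 0 else countZerosRecA string.toList n.toNat

-- ===== PORT B =====
-- B: count = 0; for i in range(n): if string[i] == '0': count += 1
def count_zeros_v2_alt (string : String) (n : Int) : Int :=
  (PySem.List.pyRange 0 n 1).foldl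
    (fun count i => if PySem.List.pyGetD string.toList i ' ' = '0' then count + 1 else count) 0

-- ===== PRECONDITION & SPEC =====
-- Pre_ excludes exactly the inputs where Python A raises: negative n (RecursionError) and
-- n > len(string) (IndexError).
def Pre_count_zeros_v2 (string : String) (n : Int) : Prop :=
  0 ≤ n ∧ n ≤ (string.toList.length : Int)
instance (string : String) (n : Int) : Decidable (Pre_count_zeros_v2 string n) := by
  unfold Pre_count_zeros_v2; infer_instance
def pvWitness_count_zeros_v2 : String × Int := ("a0b0", 3)

def Spec_count_zeros_v2 (string : String) (n : Int) (out : Int) : Prop := out = count_zeros_v2_alt string n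
instance (string : String) (n : Int) (out : Int) : Decidable (Spec_count_zeros_v2 string n out) := by unfold Spec_count_zeros_v2; infer_instance

-- ===== CLAIM (what is proved, stated in full; the proofs are below) =====
def Claim_equal_count_zeros_v2 : Prop := ∀ (string : String) (n : Int), Dom_count_zeros_v2 string n → Pre_count_zeros_v2 string n → Spec_count_zeros_v2 string n (count_zeros_v2 string n)

-- ===== LEMMAS AND PROOFS =====

-- A's recursion on k equals B's fold over range(0, k).
theorem countZerosRecA_eq_fold (s : List Char) (k : Nat) :
    countZerosRecA s k =
      (PySem.List.pyRange 0 (k : Int) 1).foldl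
        (fun count i => if PySem.List.pyGetD s i ' ' = '0' then count + 1 else count) 0 := by
  induction k with
  | zero => simp [countZerosRecA, PySem.List.pyRange_one_eq_nil]
  | succ k ih =>
    have h : ((k + 1 : Nat) : Int) = (k : Int) + 1 := by push_cast; ring
    rw [h, PySem.List.pyRange_one_succ_right (by positivity), List.foldl_append]
    simp [countZerosRecA, ih]

-- ===== VERDICT (by name: the statement is the Claim_ definition above) =====
theorem count_zeros_v2_spec : Claim_equal_count_zeros_v2 := by
  intro s n _ hpre
  unfold Spec_count_zeros_v2 count_zeros_v2 count_zeros_v2_alt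
  obtain ⟨h0, _⟩ := hpre
  have hn : ((n.toNat : Nat) : Int) = n := Int.toNat_of_nonneg h0
  by_cases hz : n = 0
  · simp [hz, PySem.List.pyRange_one_eq_nil]
  · rw [if_neg hz, countZerosRecA_eq_fold, hn]
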